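-- pv_equiv track=rewrite | github.com/KINnao087/-Agent | core/infrastructure/scraper/scraper.py | _unscramble_acw_arg1
-- ===== SOURCE A (Python) =====
-- ACW_SC_V2_PERMUTATION = [
--     0xF,
--     0x23,
--     0x1D,
--     0x18,
--     0x21,
--     0x10,
--     0x1,
--     0x26,
--     0xA,
--     0x9,
--     0x13,
--     0x1F,
--     0x28,
--     0x1B,
--     0x16,
--     0x17,
--     0x19,
--     0xD,
--     0x6,
--     0xB,
--     0x27,
--     0x12,
--     0x14,
--     0x8,
--     0xE,
--     0x15,
--     0x20,
--     0x1A,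
--     0x2,
--     0x1E,
--     0x7,
--     0x4,
--     0x11,
--     0x5,
--     0x3,
--     0x1C,
--     0x22,
--     0x25,
--     0xC,
--     0x24,
-- ]
--
-- def _unscramble_acw_arg1(arg1: str) -> str:
--     """按阿里云 WAF 的固定置换表还原 arg1。"""
--     restored = [""] * len(ACW_SC_V2_PERMUTATION)
--     for index, char in enumerate(arg1):
--         for target_index, position in enumerate(ACW_SC_V2_PERMUTATION):
--             if position == index + 1:
--                 restored[target_index] = char
--                 break
--     return "".join(restored)
-- ===== SOURCE B (Python) =====
-- ACW_SC_V2_PERMUTATION = [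
--     0xF, 0x23, 0x1D, 0x18, 0x21, 0x10, 0x1, 0x26, 0xA, 0x9,
--     0x13, 0x1F, 0x28, 0x1B, 0x16, 0x17, 0x19, 0xD, 0x6, 0xB,
--     0x27, 0x12, 0x14, 0x8, 0xE, 0x15, 0x20, 0x1A, 0x2, 0x1E,
--     0x7, 0x4, 0x11, 0x5, 0x3, 0x1C, 0x22, 0x25, 0xC, 0x24,
-- ]
--
--
-- def _unscramble_acw_arg1(arg1: str) -> str:
--     # Gather pass: slot j takes the input character at position perm[j]-1,
--     # or stays empty when the input is too short to have one.
--     n = len(arg1)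
--     return "".join(arg1[p - 1] if p - 1 < n else "" for p in ACW_SC_V2_PERMUTATION)
-- ===== Notes on version B (the rewrite author's own statement) =====
-- stated objective: faster
-- what changed: Replaces the nested loops (for each input character, a linear scan of the 40-entry permutation table) by a single gather pass over the table that indexes directly into arg1, so the inner scan disappears.
import Mathlib
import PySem

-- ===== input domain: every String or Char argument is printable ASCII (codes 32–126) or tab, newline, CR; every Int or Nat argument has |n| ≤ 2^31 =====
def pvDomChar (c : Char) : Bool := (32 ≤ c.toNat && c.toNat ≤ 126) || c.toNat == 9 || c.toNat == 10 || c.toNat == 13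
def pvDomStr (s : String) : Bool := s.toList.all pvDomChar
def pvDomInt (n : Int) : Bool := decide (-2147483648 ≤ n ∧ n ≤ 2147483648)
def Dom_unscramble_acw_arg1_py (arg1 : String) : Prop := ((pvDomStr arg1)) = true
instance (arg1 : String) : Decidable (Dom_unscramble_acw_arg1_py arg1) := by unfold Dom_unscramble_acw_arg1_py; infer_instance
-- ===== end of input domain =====

-- B replaces A's per-character scan of the permutation table by one gather pass over the table.

-- ===== PORT A =====
def pvPermL : List Int :=
  [15, 35, 29, 24, 33, 16, 1, 38, 10, 9, 19, 31, 40, 27, 22, 23, 25, 13, 6, 11,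
   39, 18, 20, 8, 14, 21, 32, 26, 2, 30, 7, 4, 17, 5, 3, 28, 34, 37, 12, 36]

-- inner 'for target_index, position in enumerate(ACW_SC_V2_PERMUTATION): if position == index+1: restored[target_index]=char; break'
def pvSetFirst (pairs : List (Int × Int)) (r : List String) (idx : Int) (c : Char) : List String :=
  match pairs with
  | [] => r
  | (t, p) :: rest =>
      if p = idx + 1 then PySem.List.pySetD r t (String.ofList [c])
      else pvSetFirst rest r idx c

def unscramble_acw_arg1_py (arg1 : String) : String :=
  let restored := List.replicate pvPermL.length ""
  PySem.Str.join ""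
    ((PySem.List.enumerate arg1.toList 0).foldl
      (fun r ic => pvSetFirst (PySem.List.enumerate pvPermL 0) r ic.1 ic.2) restored)

-- ===== PORT B =====
def unscramble_acw_arg1_py_alt (arg1 : String) : String :=
  let cs := arg1.toList
  let n : Int := cs.length
  PySem.Str.join ""
    (pvPermL.map (fun p =>
      if p - 1 < n then ((PySem.List.pyGet? cs (p - 1)).map (fun c => String.ofList [c])).getD ""
      else ""))

-- ===== PRECONDITION & SPEC =====
def Spec_unscramble_acw_arg1_py (arg1 : String) (out : String) : Prop := out = unscramble_acw_arg1_py_alt arg1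
instance (arg1 : String) (out : String) : Decidable (Spec_unscramble_acw_arg1_py arg1 out) := by unfold Spec_unscramble_acw_arg1_py; infer_instance

-- ===== CLAIM (what is proved, stated in full; the proofs are below) =====
def Claim_equal_unscramble_acw_arg1_py : Prop := ∀ (arg1 : String), Dom_unscramble_acw_arg1_py arg1 → Spec_unscramble_acw_arg1_py arg1 (unscramble_acw_arg1_py arg1)

-- ===== LEMMAS AND PROOFS =====

theorem pvSetFirst_length (pairs : List (Int × Int)) (r : List String) (idx : Int) (c : Char) :
    (pvSetFirst pairs r idx c).length = r.length := by
  induction pairs generalizing r with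
  | nil => rfl
  | cons hd rest ih =>
      obtain ⟨t, p⟩ := hd
      simp only [pvSetFirst]
      split
      · exact PySem.List.length_pySetD r t (String.ofList [c])
      · exact ih r

theorem pvSetFirst_getElem? (pairs : List (Int × Int)) (r : List String) (idx : Int) (c : Char)
    (hd : pairs.Pairwise (fun a b => a.2 ≠ b.2))
    (hn : ∀ x ∈ pairs, 0 ≤ x.1) (j : Nat) :
    (pvSetFirst pairs r idx c)[j]? =
      if ((j : Int), idx + 1) ∈ pairs ∧ j < r.length then some (String.ofList [c]) else r[j]? := by
  induction pairs generalizing r with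
  | nil => simp [pvSetFirst]
  | cons x rest ih =>
      obtain ⟨t, p⟩ := x
      have ht0 : 0 ≤ t := hn (t, p) (List.mem_cons_self)
      have hrest : ∀ x ∈ rest, 0 ≤ x.1 := fun x hx => hn x (List.mem_cons_of_mem _ hx)
      rw [List.pairwise_cons] at hd
      simp only [pvSetFirst]
      by_cases hp : p = idx + 1
      · rw [if_pos hp, PySem.List.pySetD_of_nonneg _ _ ht0, List.getElem?_set]
        by_cases hjt : (j : Int) = t
        · have htj : t.toNat = j := by omega
          have hmem : ((j : Int), idx + 1) ∈ (t, p) :: rest := by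
            rw [List.mem_cons]; left; rw [Prod.mk.injEq]; exact ⟨hjt, hp.symm⟩
          simp only [htj, hmem, true_and]
          by_cases hlen : j < r.length
          · simp [hlen]
          · simp only [if_neg hlen]
            rw [List.getElem?_eq_none (by omega)]
            simp
        · have htj : ¬ (t.toNat = j) := by omega
          have hmem : ¬ (((j : Int), idx + 1) ∈ (t, p) :: rest) := by
            rw [List.mem_cons]
            rintro (heq | hmem')
            · rw [Prod.mk.injEq] at heq; exact hjt heq.1
            · exact hd.1 _ hmem' (by rw [← hp])
          simp [htj, hmem]
      · rw [if_neg hp, ih r hd.2 hrest]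
        have : (((j : Int), idx + 1) ∈ (t, p) :: rest) ↔ (((j : Int), idx + 1) ∈ rest) := by
          rw [List.mem_cons]
          constructor
          · rintro (heq | h')
            · rw [Prod.mk.injEq] at heq; exact absurd heq.2.symm hp
            · exact h'
          · exact Or.inr
        simp only [this]

theorem pvMemEnumPerm (j : Nat) (hj : j < 40) (v : Int) :
    (((j : Nat) : Int), v) ∈ PySem.List.enumerate pvPermL 0 ↔ pvPermL[j]! = v := by
  have hlen : pvPermL.length = 40 := by decide
  rw [PySem.List.mem_enumerate_iff]
  constructor
  · rintro ⟨m, hm, heq⟩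
    rw [Prod.mk.injEq] at heq
    obtain ⟨h1, h2⟩ := heq
    have hmj : m = j := by omega
    subst hmj
    rw [List.getElem!_eq_getElem?_getD, List.getElem?_eq_getElem hm]
    exact h2.symm
  · intro h
    refine ⟨j, by omega, ?_⟩
    rw [Prod.mk.injEq]
    refine ⟨by omega, ?_⟩
    rw [← h, List.getElem!_eq_getElem?_getD, List.getElem?_eq_getElem (by omega)]
    rfl

theorem pvLoop_getElem? (cs : List Char) (k : Int) (r : List String) (hr : r.length = 40)
    (j : Nat) (hj : j < 40) :
    ((PySem.List.enumerate cs k).foldl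
        (fun r ic => pvSetFirst (PySem.List.enumerate pvPermL 0) r ic.1 ic.2) r)[j]? =
      if k < pvPermL[j]! ∧ pvPermL[j]! ≤ k + cs.length then
        (PySem.List.pyGet? cs (pvPermL[j]! - 1 - k)).map (fun c => String.ofList [c])
      else r[j]? := by
  induction cs generalizing k r with
  | nil =>
      rw [PySem.List.enumerate_nil, List.foldl_nil, if_neg (by simp)]
  | cons c cs ih =>
      rw [PySem.List.enumerate_cons, List.foldl_cons]
      rw [ih (k + 1) _ (by rw [pvSetFirst_length]; exact hr)]
      rw [pvSetFirst_getElem? _ _ _ _ (by decide) (by decide) j]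
      simp only [pvMemEnumPerm j hj, hr]
      set p := pvPermL[j]! with hp
      by_cases h1 : p = k + 1
      · rw [if_neg (by omega), if_pos ⟨h1, hj⟩, if_pos (by simp; omega)]
        have : p - 1 - k = 0 := by omega
        rw [this, PySem.List.pyGet?_zero_cons, Option.map_some]
      · by_cases h2 : k + 1 < p ∧ p ≤ k + 1 + cs.length
        · rw [if_pos h2, if_pos (by simp; omega)]
          rw [PySem.List.pyGet?_eq_some_getElem _ (by omega) (by omega)]
          rw [PySem.List.pyGet?_eq_some_getElem _ (by omega)
            (by simp only [List.length_cons]; push_cast; omega)]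
          have hidx : (p - 1 - k).toNat = (p - 1 - (k + 1)).toNat + 1 := by omega
          simp only [Option.map_some, hidx, List.getElem_cons_succ]
        · rw [if_neg h2, if_neg (by simp; omega), if_neg (by simp at h2 ⊢; omega)]

theorem pvLoop_length (cs : List Char) (k : Int) (r : List String) :
    ((PySem.List.enumerate cs k).foldl
        (fun r ic => pvSetFirst (PySem.List.enumerate pvPermL 0) r ic.1 ic.2) r).length = r.length := by
  induction cs generalizing k r with
  | nil => rw [PySem.List.enumerate_nil, List.foldl_nil]
  | cons c cs ih => rw [PySem.List.enumerate_cons, List.foldl_cons, ih, pvSetFirst_length]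

theorem pvLists_eq (cs : List Char) :
    (PySem.List.enumerate cs 0).foldl
        (fun r ic => pvSetFirst (PySem.List.enumerate pvPermL 0) r ic.1 ic.2)
        (List.replicate pvPermL.length "") =
      pvPermL.map (fun p =>
        if p - 1 < (cs.length : Int) then
          ((PySem.List.pyGet? cs (p - 1)).map (fun c => String.ofList [c])).getD ""
        else "") := by
  have hlen : pvPermL.length = 40 := by decide
  have hpos : ∀ j : Nat, j < 40 → 0 < pvPermL[j]! := by decide
  apply List.ext_getElem?
  intro j
  by_cases hj : j < 40
  · have hj' : j < pvPermL.length := by omega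
    rw [pvLoop_getElem? cs 0 _ (by rw [List.length_replicate]; exact hlen) j hj]
    have hmap : pvPermL[j]? = some pvPermL[j] := List.getElem?_eq_getElem hj'
    rw [List.getElem?_map, hmap, Option.map_some]
    have hpj : pvPermL[j]! = pvPermL[j] := by
      rw [List.getElem!_eq_getElem?_getD, hmap]
      rfl
    have hp0 : 0 < pvPermL[j] := by rw [← hpj]; exact hpos j hj
    simp only [hpj, sub_zero, zero_add]
    by_cases hc : pvPermL[j] ≤ (cs.length : Int)
    · rw [if_pos ⟨hp0, hc⟩, if_pos (by omega),
        PySem.List.pyGet?_eq_some_getElem _ (by omega) (by omega)]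
      rfl
    · rw [if_neg (by omega), if_neg (by omega), List.getElem?_replicate, if_pos (by omega)]
  · rw [List.getElem?_eq_none (by rw [pvLoop_length, List.length_replicate]; omega),
        List.getElem?_eq_none (by rw [List.length_map]; omega)]

-- ===== VERDICT (by name: the statement is the Claim_ definition above) =====
theorem unscramble_acw_arg1_py_spec : Claim_equal_unscramble_acw_arg1_py := by
  intro arg1 _
  unfold Spec_unscramble_acw_arg1_py unscramble_acw_arg1_py unscramble_acw_arg1_py_alt
  exact congrArg (PySem.Str.join "") (pvLists_eq arg1.toList)
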